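-- pv_equiv track=rewrite | github.com/iamrobinhood12345/extra_katas2 | src/string_pyramid/string_pyramid.py | watch_pyramid_from_above
-- ===== SOURCE A (Python) =====
-- def watch_pyramid_from_above(characters):
--     """View pyramid from above."""
--     if characters is None:
--         return None
--     if characters == '':
--         return ''
--     above = ''
--     for i in range(len(characters)):
--         above += characters[:i] + (characters[i] * ((len(characters) * 2 - 1) - i * 2)) + characters[:i][::-1] + '\n'
--     for i in range(len(characters) - 2, -1, -1):
--         above += characters[:i] + (characters[i] * ((len(characters) * 2 - 1) - i * 2)) + characters[:i][::-1] + '\n'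
--     return above[:-1]
-- ===== SOURCE B (Python) =====
-- def watch_pyramid_from_above(characters):
--     """View pyramid from above."""
--     if characters is None:
--         return None
--     if characters == '':
--         return ''
--     n = len(characters)
--     w = 2 * n - 1
--     # mutable canvas holding the innermost (most varied) row
--     row = list(characters + characters[-2::-1])
--     half = []
--     # paint outward: widen the centre stripe, emitting rows middle-out
--     for i in range(n - 1, -1, -1):
--         row[i:w - i] = characters[i] * (w - 2 * i)
--         half.append(''.join(row))
--     return '\n'.join(half[::-1] + half[1:])
-- ===== Notes on version B (the rewrite author's own statement) =====
-- stated objective: alternative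
-- what changed: B paints a single mutable canvas row middle-out - each step widens the centre stripe in place with a slice assignment and emits the row - then mirrors the emitted list, instead of A's two index loops that rebuild every row from string slices and repeat the top half for the bottom.
import Mathlib
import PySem

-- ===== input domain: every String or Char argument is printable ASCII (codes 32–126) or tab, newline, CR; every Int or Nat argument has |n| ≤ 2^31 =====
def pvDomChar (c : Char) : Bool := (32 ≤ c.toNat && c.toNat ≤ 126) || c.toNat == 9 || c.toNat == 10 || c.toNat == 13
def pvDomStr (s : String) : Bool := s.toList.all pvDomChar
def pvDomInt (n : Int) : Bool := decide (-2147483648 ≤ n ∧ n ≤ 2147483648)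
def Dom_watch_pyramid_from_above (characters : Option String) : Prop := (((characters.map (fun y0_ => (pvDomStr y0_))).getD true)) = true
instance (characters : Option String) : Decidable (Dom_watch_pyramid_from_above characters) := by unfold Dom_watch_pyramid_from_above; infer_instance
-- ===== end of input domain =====

-- B paints one mutable canvas row middle-out with widening slice assignments, emitting each row
-- once, instead of A's two index loops that rebuild every row from slices (alternative algorithm).


-- ===== PORT A =====
-- 'characters[i]' is ported as pyGetD (i is drawn from range(len(characters)), always in range);
-- '[::-1]' is ported as .reverse (exact: PySem.List.slice?_none_none_neg_one); 'above[:-1]' as slice.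
def watch_pyramid_from_above (characters : Option String) : Option String :=
  match characters with
  | none => none
  | some s =>
    if s = "" then some "" else
      let cs := s.toList
      let n : Int := (cs.length : Int)
      -- for i in range(len(characters)): above += characters[:i] + characters[i]*((n*2-1)-i*2) + characters[:i][::-1] + '\n'
      let above1 : List Char := (PySem.List.pyRange 0 n 1).foldl (fun acc i =>
        acc ++ (PySem.List.slice cs none (some i)
          ++ PySem.List.pyRepeat [PySem.List.pyGetD cs i ' '] (n * 2 - 1 - i * 2)
          ++ (PySem.List.slice cs none (some i)).reverse
          ++ ['\n'])) []
      -- for i in range(len(characters)-2, -1, -1): same body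
      let above2 : List Char := (PySem.List.pyRange (n - 2) (-1) (-1)).foldl (fun acc i =>
        acc ++ (PySem.List.slice cs none (some i)
          ++ PySem.List.pyRepeat [PySem.List.pyGetD cs i ' '] (n * 2 - 1 - i * 2)
          ++ (PySem.List.slice cs none (some i)).reverse
          ++ ['\n'])) above1
      some (String.ofList (PySem.List.slice above2 none (some (-1))))

-- ===== PORT B =====
-- loop body: the slice assignment row[i:w-i] = characters[i]*(w-2*i) is ported as
-- row[:i] ++ characters[i]*(w-2*i) ++ row[w-i:] (exact for these in-range bounds);
-- the canvas is a List Char (Python: list of 1-char strings), so ''.join(row) is the canvas itself.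
def bStep (cs : List Char) (w : Int) (st : List Char × List (List Char)) (i : Int) :
    List Char × List (List Char) :=
  let row := PySem.List.slice st.1 none (some i)
    ++ PySem.List.pyRepeat [PySem.List.pyGetD cs i ' '] (w - 2 * i)
    ++ PySem.List.slice st.1 (some (w - i)) none
  (row, st.2 ++ [row])

-- 'characters[-2::-1]' is the reverse of characters[:-1], ported as cs.dropLast.reverse (exact);
-- 'half[::-1]' as .reverse (PySem.List.slice?_none_none_neg_one); 'half[1:]' as slice from 1.
def watch_pyramid_from_above_alt (characters : Option String) : Option String :=
  match characters with
  | none => none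
  | some s =>
    if s = "" then some "" else
      let cs := s.toList
      let n : Int := (cs.length : Int)
      let w : Int := 2 * n - 1
      let row0 : List Char := cs ++ cs.dropLast.reverse
      let half : List (List Char) :=
        ((PySem.List.pyRange (n - 1) (-1) (-1)).foldl (bStep cs w) (row0, [])).2
      some (String.ofList (PySem.Chars.join ['\n']
        (half.reverse ++ PySem.List.slice half (some 1) none)))

-- ===== PRECONDITION & SPEC =====
def Spec_watch_pyramid_from_above (characters : Option String) (out : Option String) : Prop := out = watch_pyramid_from_above_alt characters
instance (characters : Option String) (out : Option String) : Decidable (Spec_watch_pyramid_from_above characters out) := by unfold Spec_watch_pyramid_from_above; infer_instance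

-- ===== CLAIM (what is proved, stated in full; the proofs are below) =====
def Claim_equal_watch_pyramid_from_above : Prop := ∀ (characters : Option String), Dom_watch_pyramid_from_above characters → Spec_watch_pyramid_from_above characters (watch_pyramid_from_above characters)

-- ===== LEMMAS AND PROOFS =====

-- the row shape of A, used only in the proofs
def pvRow (cs : List Char) (n i : Int) : List Char :=
  PySem.List.slice cs none (some i)
    ++ PySem.List.pyRepeat [PySem.List.pyGetD cs i ' '] (2 * n - 1 - 2 * i)
    ++ (PySem.List.slice cs none (some i)).reverse

-- A's list of top-half rows
def pvRowsA (cs : List Char) : List (List Char) :=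
  (PySem.List.pyRange 0 (cs.length : Int) 1).map (fun i => pvRow cs (cs.length : Int) i)

-- join with a separator = concatenate rows each followed by the separator, then drop the trailing one
theorem pvJoin_eq (c : Char) (l : List (List Char)) (h : l ≠ []) :
    (l.flatMap (fun r => r ++ [c])).dropLast = PySem.Chars.join [c] l := by
  induction l with
  | nil => exact absurd rfl h
  | cons x t ih =>
    cases t with
    | nil => simp [PySem.Chars.join_singleton]
    | cons y t' =>
      have hne : ((y :: t').flatMap (fun r => r ++ [c])) ≠ [] := by simp
      rw [List.flatMap_cons, List.dropLast_append_of_ne_nil hne,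
        PySem.Chars.join_cons_cons, ih (by simp)]

-- list-level core of A: the two folds followed by [:-1] equal the mirrored-rows join
theorem pvCore (cs : List Char) (h : cs ≠ []) :
    PySem.List.slice
      ((PySem.List.pyRange ((cs.length : Int) - 2) (-1) (-1)).foldl (fun acc i =>
        acc ++ (PySem.List.slice cs none (some i)
          ++ PySem.List.pyRepeat [PySem.List.pyGetD cs i ' '] ((cs.length : Int) * 2 - 1 - i * 2)
          ++ (PySem.List.slice cs none (some i)).reverse
          ++ ['\n']))
        ((PySem.List.pyRange 0 (cs.length : Int) 1).foldl (fun acc i =>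
          acc ++ (PySem.List.slice cs none (some i)
            ++ PySem.List.pyRepeat [PySem.List.pyGetD cs i ' '] ((cs.length : Int) * 2 - 1 - i * 2)
            ++ (PySem.List.slice cs none (some i)).reverse
            ++ ['\n'])) []))
      none (some (-1))
    = PySem.Chars.join ['\n'] (pvRowsA cs ++ (pvRowsA cs).dropLast.reverse) := by
  set n : Int := (cs.length : Int) with hn
  have hm1 : (1 : Int) ≤ n := by
    have : 0 < cs.length := List.length_pos_of_ne_nil h
    omega
  have hbody : (fun (acc : List Char) (i : Int) =>
      acc ++ (PySem.List.slice cs none (some i)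
        ++ PySem.List.pyRepeat [PySem.List.pyGetD cs i ' '] (n * 2 - 1 - i * 2)
        ++ (PySem.List.slice cs none (some i)).reverse
        ++ ['\n']))
      = (fun acc i => acc ++ (pvRow cs n i ++ ['\n'])) := by
    funext acc i
    have : n * 2 - 1 - i * 2 = 2 * n - 1 - 2 * i := by ring
    simp [pvRow, this]
  rw [hbody, PySem.List.foldl_append_eq_flatMap, PySem.List.foldl_append_eq_flatMap,
    List.nil_append, ← List.flatMap_append]
  have hr2 : PySem.List.pyRange (n - 2) (-1) (-1) = (PySem.List.pyRange 0 (n - 1) 1).reverse := by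
    rw [PySem.List.pyRange_neg_one_eq_reverse, show (-1:Int)+1 = 0 from by norm_num,
      show n-2+1 = n-1 from by ring]
  have hr1 : PySem.List.pyRange 0 n 1 = PySem.List.pyRange 0 (n - 1) 1 ++ [n - 1] := by
    have := PySem.List.pyRange_one_succ_right (a := 0) (b := n - 1) (by omega)
    simpa using this
  have hflat : (PySem.List.pyRange 0 n 1 ++ PySem.List.pyRange (n - 2) (-1) (-1)).flatMap
        (fun i => pvRow cs n i ++ ['\n'])
      = ((PySem.List.pyRange 0 n 1 ++ PySem.List.pyRange (n - 2) (-1) (-1)).map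
          (fun i => pvRow cs n i)).flatMap (fun r => r ++ ['\n']) := by
    rw [List.flatMap_map]
  rw [hflat]
  have hdl : (pvRowsA cs).dropLast = (PySem.List.pyRange 0 (n - 1) 1).map (fun i => pvRow cs n i) := by
    rw [pvRowsA, ← hn, hr1, List.map_append, List.map_singleton, List.dropLast_concat]
  have hmap : (PySem.List.pyRange 0 n 1 ++ PySem.List.pyRange (n - 2) (-1) (-1)).map
        (fun i => pvRow cs n i) = pvRowsA cs ++ (pvRowsA cs).dropLast.reverse := by
    rw [List.map_append, hdl, hr2, List.map_reverse, pvRowsA, ← hn]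
  rw [hmap, PySem.List.slice_to_neg_one]
  apply pvJoin_eq
  intro habs
  have hrows : pvRowsA cs = [] := (List.append_eq_nil_iff.mp habs).1
  have hlen := congrArg List.length hrows
  rw [pvRowsA, List.length_map, PySem.List.length_pyRange_one] at hlen
  simp only [List.length_nil] at hlen
  have hpos : 0 < cs.length := List.length_pos_of_ne_nil h
  omega

-- A's row at a Nat index, in take/replicate form
theorem pvRow_natCast (cs : List Char) (j : Nat) (hj : j < cs.length) :
    pvRow cs (cs.length : Int) (j : Int)
      = cs.take j ++ List.replicate (2 * cs.length - 1 - 2 * j) (PySem.List.pyGetD cs (j : Int) ' ')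
          ++ (cs.take j).reverse := by
  unfold pvRow
  rw [PySem.List.slice_to_natCast, PySem.List.pyRepeat_singleton,
    show (2 * (cs.length : Int) - 1 - 2 * (j : Int)).toNat = 2 * cs.length - 1 - 2 * j from by omega]

-- painting the centre stripe of a canvas whose outer parts are correct yields A's row j
theorem pvPaint (cs : List Char) (canvas : List Char) (acc : List (List Char)) (j : Nat) (hj : j < cs.length)
    (hT : canvas.take j = cs.take j)
    (hD : canvas.drop (2 * cs.length - 1 - j) = (cs.take j).reverse) :
    bStep cs (2 * (cs.length : Int) - 1) (canvas, acc) (j : Int)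
      = (pvRow cs (cs.length : Int) (j : Int), acc ++ [pvRow cs (cs.length : Int) (j : Int)]) := by
  unfold bStep
  have h1 : PySem.List.slice canvas none (some (j : Int)) = canvas.take j :=
    PySem.List.slice_to_natCast canvas j
  have h2 : PySem.List.slice canvas (some (2 * (cs.length : Int) - 1 - (j : Int))) none
      = canvas.drop (2 * cs.length - 1 - j) := by
    rw [PySem.List.slice_from _ (by omega)]
    congr 1
    omega
  have h3 : PySem.List.pyRepeat [PySem.List.pyGetD cs (j : Int) ' '] (2 * (cs.length : Int) - 1 - 2 * (j : Int))
      = List.replicate (2 * cs.length - 1 - 2 * j) (PySem.List.pyGetD cs (j : Int) ' ') := by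
    rw [PySem.List.pyRepeat_singleton]
    congr 1
    omega
  simp only [h1, h2, h3, hT, hD]
  rw [pvRow_natCast cs j hj]

-- the painted row j+1 has the correct outer parts for painting row j
theorem pvRow_take (cs : List Char) (j : Nat) (hj : j + 1 < cs.length) :
    (pvRow cs (cs.length : Int) ((j : Int) + 1)).take j = cs.take j := by
  have : ((j : Int) + 1) = ((j + 1 : Nat) : Int) := by omega
  rw [this, pvRow_natCast cs (j + 1) hj]
  rw [List.take_append_of_le_length (by simp; omega),
    List.take_append_of_le_length (by simp [List.length_take]; omega), List.take_take]
  congr 1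
  omega

theorem pvRow_drop (cs : List Char) (j : Nat) (hj : j + 1 < cs.length) :
    (pvRow cs (cs.length : Int) ((j : Int) + 1)).drop (2 * cs.length - 1 - j)
      = (cs.take j).reverse := by
  have hcast : ((j : Int) + 1) = ((j + 1 : Nat) : Int) := by omega
  rw [hcast, pvRow_natCast cs (j + 1) hj]
  have hlen : (cs.take (j + 1) ++ List.replicate (2 * cs.length - 1 - 2 * (j + 1))
      (PySem.List.pyGetD cs ((j + 1 : Nat) : Int) ' ')).length = 2 * cs.length - 2 - j := by
    simp [List.length_take]
    omega
  rw [show 2 * cs.length - 1 - j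
      = (cs.take (j + 1) ++ List.replicate (2 * cs.length - 1 - 2 * (j + 1))
          (PySem.List.pyGetD cs ((j + 1 : Nat) : Int) ' ')).length + 1 from by rw [hlen]; omega,
    List.drop_length_add_append, List.drop_one, List.tail_reverse]
  congr 1
  rw [List.dropLast_eq_take, List.take_take, List.length_take]
  congr 1
  omega

-- canvas-fold invariant: painting indices j,j-1,…,0 appends rows j,…,0 and ends at row 0
theorem pvFold (cs : List Char) :
    ∀ (j : Nat), j < cs.length → ∀ (canvas : List Char) (acc : List (List Char)),
      canvas.take j = cs.take j →
      canvas.drop (2 * cs.length - 1 - j) = (cs.take j).reverse →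
      (PySem.List.pyRange (j : Int) (-1) (-1)).foldl (bStep cs (2 * (cs.length : Int) - 1)) (canvas, acc)
        = (pvRow cs (cs.length : Int) 0,
           acc ++ ((PySem.List.pyRange 0 ((j : Int) + 1) 1).map
             (fun i => pvRow cs (cs.length : Int) i)).reverse) := by
  intro j
  induction j with
  | zero =>
    intro hj canvas acc hT hD
    rw [PySem.List.pyRange_neg_one_cons (by omega), PySem.List.pyRange_neg_one_eq_nil (by omega)]
    simp only [List.foldl_cons, List.foldl_nil, Nat.cast_zero]
    have hp := pvPaint cs canvas acc 0 hj hT hD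
    rw [Nat.cast_zero] at hp
    rw [hp, PySem.List.pyRange_one_singleton]
    simp
  | succ j ih =>
    intro hj canvas acc hT hD
    rw [PySem.List.pyRange_neg_one_cons (by omega)]
    simp only [List.foldl_cons]
    rw [pvPaint cs canvas acc (j + 1) hj hT hD]
    have hc : ((j + 1 : Nat) : Int) = (j : Int) + 1 := by omega
    rw [show ((j + 1 : Nat) : Int) - 1 = (j : Int) from by omega]
    rw [ih (by omega) _ _
      (by rw [hc]; exact pvRow_take cs j hj)
      (by rw [hc]; exact pvRow_drop cs j hj)]
    rw [hc, show (j : Int) + 1 + 1 = ((j : Int) + 1) + 1 from rfl,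
      PySem.List.pyRange_one_succ_right (a := 0) (b := (j : Int) + 1) (by omega)]
    simp [List.append_assoc]

-- ===== VERDICT (by name: the statement is the Claim_ definition above) =====
theorem watch_pyramid_from_above_spec : Claim_equal_watch_pyramid_from_above := by
  intro characters _
  unfold Spec_watch_pyramid_from_above watch_pyramid_from_above watch_pyramid_from_above_alt
  match characters with
  | none => rfl
  | some s =>
    by_cases hs : s = ""
    · simp [hs]
    · have hcs : s.toList ≠ [] := by
        intro h
        exact hs (by simpa using congrArg String.ofList h)
      have hpos : 0 < s.toList.length := List.length_pos_of_ne_nil hcs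
      simp only [hs, if_false]
      refine congrArg (fun l => some (String.ofList l)) ?_
      rw [pvCore s.toList hcs]
      set cs := s.toList with hcsdef
      have hT : (cs ++ cs.dropLast.reverse).take (cs.length - 1) = cs.take (cs.length - 1) := by
        rw [List.take_append_of_le_length (by omega)]
      have hD : (cs ++ cs.dropLast.reverse).drop (2 * cs.length - 1 - (cs.length - 1))
          = (cs.take (cs.length - 1)).reverse := by
        rw [show 2 * cs.length - 1 - (cs.length - 1) = cs.length from by omega, List.drop_left,
          ← List.dropLast_eq_take]
      have hhalf : ((PySem.List.pyRange ((cs.length : Int) - 1) (-1) (-1)).foldl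
            (bStep cs (2 * (cs.length : Int) - 1)) (cs ++ cs.dropLast.reverse, [])).2
          = (pvRowsA cs).reverse := by
        rw [show ((cs.length : Int) - 1) = ((cs.length - 1 : Nat) : Int) from by omega]
        rw [pvFold cs (cs.length - 1) (by omega) (cs ++ cs.dropLast.reverse) [] hT hD]
        rw [show (((cs.length - 1 : Nat) : Int) + 1) = (cs.length : Int) from by omega]
        rw [pvRowsA]
        simp
      rw [hhalf, List.reverse_reverse, PySem.List.slice_from_one, List.tail_reverse]
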